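-- pv_equiv track=rewrite | github.com/misha7kurudz/MathematicalStatistics | function.py | getQuant
-- ===== SOURCE A (Python) =====
-- def getQuant(a):
--     n = len(a)
--     res = []
--     if n % 4 == 0:
--         for i in range(1, 4):
--             res.append(["Q" + str(i), str(a[(n // 4) * i - 1])])
--         res.append(["Q3 - Q1", str(a[(3 * n) // 4 - 1] - a[n // 4 - 1])])
--     if n % 10 == 0:
--         for i in range(1, 10):
--             res.append(["D" + str(i), str(a[(n // 10) * i - 1])])
--         res.append(["D9 - D1", str(a[(9 * n) // 10 - 1] - a[n // 10 - 1])])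
--     if n % 100 == 0:
--         for i in range(1, 100):
--             res.append(["C" + str(i), str(a[(n // 100) * i - 1])])
--         res.append(["C99 - C1", str(a[(99 * n) // 100 - 1] - a[n // 100 - 1])])
--     if n % 1000 == 0:
--         for i in range(1, 1000):
--             res.append(["M" + str(i / 10), str(a[(n // 1000) * i - 1])])
--         res.append(["M99,9 - M0,1", str(a[(999 * n) // 1000 - 1] - a[n // 1000 - 1])])
--     return res
-- ===== SOURCE B (Python) =====
-- def getQuant(a):
--     n = len(a)
--     table = ((4, "Q", "Q3 - Q1", False),
--              (10, "D", "D9 - D1", False),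
--              (100, "C", "C99 - C1", False),
--              (1000, "M", "M99,9 - M0,1", True))
--     active = [fam for fam in table if n % fam[0] == 0]
--     buckets = [[] for _ in active]
--     # single streaming pass over the data: position p (1-based) is the i-th
--     # d-quantile boundary exactly when p is a multiple of step = n // d, p < n
--     for j, v in enumerate(a):
--         p = j + 1
--         for k, (d, pre, _, flt) in enumerate(active):
--             step = n // d
--             if p % step == 0 and p < n:
--                 i = p // step
--                 label = pre + (f"{i // 10}.{i % 10}" if flt else str(i))
--                 buckets[k].append([label, str(v)])
--     res = []
--     for (d, _, spread, _), bucket in zip(active, buckets):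
--         step = n // d
--         res += bucket
--         res.append([spread, str(a[n - step - 1] - a[step - 1])])
--     return res
-- ===== Notes on version B (the rewrite author's own statement) =====
-- stated objective: alternative
-- what changed: A indexes the sorted array at a[(n//div)*i - 1] in four per-family index loops; B instead makes one streaming pass over the data, treating 1-based position p as a quantile boundary of family div exactly when p % (n//div) == 0 and p < n, collecting rows into per-family buckets in that single pass and concatenating them (spread rows from two direct end lookups).
-- outside the precondition, e.g. on getQuant([]): A raises IndexError, B raises IndexError
import Mathlib
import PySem

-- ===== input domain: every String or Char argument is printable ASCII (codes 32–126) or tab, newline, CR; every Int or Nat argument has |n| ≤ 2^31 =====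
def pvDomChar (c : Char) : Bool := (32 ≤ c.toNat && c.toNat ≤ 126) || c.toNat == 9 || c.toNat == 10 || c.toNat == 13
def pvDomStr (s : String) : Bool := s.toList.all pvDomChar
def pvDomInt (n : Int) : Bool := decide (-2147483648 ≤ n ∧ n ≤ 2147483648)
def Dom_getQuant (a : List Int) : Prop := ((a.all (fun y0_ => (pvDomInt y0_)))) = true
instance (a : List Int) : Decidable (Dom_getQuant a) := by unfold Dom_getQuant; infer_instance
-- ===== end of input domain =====

-- B replaces A's per-family indexed lookups (a[(n//div)*i - 1] for each quantile index i)
-- with ONE streaming pass over the data: position p is a d-quantile boundary exactly when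
-- p % (n//d) == 0 and p < n, and the boundary values are collected into per-family buckets
-- in that single pass; objective: alternative (no random access, same rows).
-- A raises IndexError on the empty list (a[-1] on []); Pre_ excludes it, B also raises there.

-- ===== PORT A =====
-- a[i] for an index Pre_ guarantees in range (Python raises where pyGet? is none)
def pvGetI (a : List Int) (i : Int) : Int := (PySem.List.pyGet? a i).getD 0

-- str(i / 10): equals this decimal form for 0 < i < 1000 (verified against CPython)
def pvStrTenthA (i : Int) : String :=
  PySem.Int.toStr (PySem.Int.floordiv i 10) ++ "." ++ PySem.Int.toStr (PySem.Int.mod i 10)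

def getQuant (a : List Int) : List (List String) :=
  let n : Int := (a.length : Int)
  let res : List (List String) := []
  let res :=
    if PySem.Int.mod n 4 = 0 then
      ((PySem.List.pyRange 1 4 1).foldl (fun r i =>
        r ++ [["Q" ++ PySem.Int.toStr i,
               PySem.Int.toStr (pvGetI a (PySem.Int.floordiv n 4 * i - 1))]]) res)
      ++ [["Q3 - Q1",
           PySem.Int.toStr (pvGetI a (PySem.Int.floordiv (3 * n) 4 - 1)
                            - pvGetI a (PySem.Int.floordiv n 4 - 1))]]
    else res
  let res :=
    if PySem.Int.mod n 10 = 0 then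
      ((PySem.List.pyRange 1 10 1).foldl (fun r i =>
        r ++ [["D" ++ PySem.Int.toStr i,
               PySem.Int.toStr (pvGetI a (PySem.Int.floordiv n 10 * i - 1))]]) res)
      ++ [["D9 - D1",
           PySem.Int.toStr (pvGetI a (PySem.Int.floordiv (9 * n) 10 - 1)
                            - pvGetI a (PySem.Int.floordiv n 10 - 1))]]
    else res
  let res :=
    if PySem.Int.mod n 100 = 0 then
      ((PySem.List.pyRange 1 100 1).foldl (fun r i =>
        r ++ [["C" ++ PySem.Int.toStr i,
               PySem.Int.toStr (pvGetI a (PySem.Int.floordiv n 100 * i - 1))]]) res)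
      ++ [["C99 - C1",
           PySem.Int.toStr (pvGetI a (PySem.Int.floordiv (99 * n) 100 - 1)
                            - pvGetI a (PySem.Int.floordiv n 100 - 1))]]
    else res
  let res :=
    if PySem.Int.mod n 1000 = 0 then
      ((PySem.List.pyRange 1 1000 1).foldl (fun r i =>
        r ++ [["M" ++ pvStrTenthA i,
               PySem.Int.toStr (pvGetI a (PySem.Int.floordiv n 1000 * i - 1))]]) res)
      ++ [["M99,9 - M0,1",
           PySem.Int.toStr (pvGetI a (PySem.Int.floordiv (999 * n) 1000 - 1)
                            - pvGetI a (PySem.Int.floordiv n 1000 - 1))]]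
    else res
  res

-- ===== PORT B =====
-- f"{i // 10}.{i % 10}"
def pvFTenthB (i : Int) : String :=
  PySem.Int.toStr (PySem.Int.floordiv i 10) ++ "." ++ PySem.Int.toStr (PySem.Int.mod i 10)

def pvTableB : List (Int × String × String × Bool) :=
  [(4, "Q", "Q3 - Q1", false), (10, "D", "D9 - D1", false),
   (100, "C", "C99 - C1", false), (1000, "M", "M99,9 - M0,1", true)]

-- the inner-loop body: update one family's bucket at data index j (position p = j+1), value v
def pvStepB (n j v : Int) (c : Int × String × String × Bool) (bk : List (List String)) :
    List (List String) :=
  let p := j + 1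
  let step := PySem.Int.floordiv n c.1
  if PySem.Int.mod p step = 0 ∧ p < n then
    let i := PySem.Int.floordiv p step
    bk ++ [[c.2.1 ++ (if c.2.2.2 then pvFTenthB i else PySem.Int.toStr i),
            PySem.Int.toStr v]]
  else bk

def getQuant_alt (a : List Int) : List (List String) :=
  let n : Int := (a.length : Int)
  let active := pvTableB.filter (fun c => decide (PySem.Int.mod n c.1 = 0))
  let buckets := active.map (fun _ => ([] : List (List String)))
  let buckets := (PySem.List.enumerate a 0).foldl
      (fun bks jv => List.zipWith (fun c bk => pvStepB n jv.1 jv.2 c bk) active bks) buckets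
  (active.zip buckets).foldl
    (fun res cb =>
      let step := PySem.Int.floordiv n cb.1.1
      res ++ cb.2
          ++ [[cb.1.2.2.1,
               PySem.Int.toStr (pvGetI a (n - step - 1) - pvGetI a (step - 1))]]) []

-- ===== PRECONDITION & SPEC =====
-- A raises IndexError on [] (every divisor divides 0 and a[-1] is taken on an empty list)
def Pre_getQuant (a : List Int) : Prop := a ≠ []
instance (a : List Int) : Decidable (Pre_getQuant a) := by unfold Pre_getQuant; infer_instance
def pvWitness_getQuant : List Int := [3, 1, 4, 1]

def Spec_getQuant (a : List Int) (out : List (List String)) : Prop := out = getQuant_alt a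
instance (a : List Int) (out : List (List String)) : Decidable (Spec_getQuant a out) := by unfold Spec_getQuant; infer_instance

-- ===== CLAIM (what is proved, stated in full; the proofs are below) =====
def Claim_equal_getQuant : Prop := ∀ (a : List Int), Dom_getQuant a → Pre_getQuant a → Spec_getQuant a (getQuant a)

-- ===== LEMMAS AND PROOFS =====

-- zipWith composed with zipWith over the same spine
theorem pv_zipWith_zipWith {γ σ : Type} (f g : γ → σ → σ) (cs : List γ) (bks : List σ) :
    List.zipWith f cs (List.zipWith g cs bks)
      = List.zipWith (fun c bk => f c (g c bk)) cs bks := by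
  induction cs generalizing bks with
  | nil => rfl
  | cons c cs ih => cases bks with
    | nil => rfl
    | cons b bks => simp [List.zipWith, ih]

theorem pv_zipWith_snd {γ σ : Type} (cs : List γ) (bks : List σ)
    (h : cs.length = bks.length) : List.zipWith (fun _ bk => bk) cs bks = bks := by
  induction cs generalizing bks with
  | nil => cases bks with | nil => rfl | cons b bks => simp at h
  | cons c cs ih => cases bks with
    | nil => simp at h
    | cons b bks => simp_all [List.zipWith]

-- a fold whose state is a list of INDEPENDENT per-family accumulators is a per-family fold
theorem pv_foldl_zipWith {α γ σ : Type} (f : γ → α → σ → σ) (xs : List α)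
    (cs : List γ) (bks : List σ) (h : cs.length = bks.length) :
    xs.foldl (fun bks x => List.zipWith (fun c bk => f c x bk) cs bks) bks
      = List.zipWith (fun c bk => xs.foldl (fun bk x => f c x bk) bk) cs bks := by
  induction xs generalizing bks with
  | nil => simp only [List.foldl_nil]; exact (pv_zipWith_snd cs bks h).symm
  | cons x xs ih =>
      simp only [List.foldl_cons]
      rw [ih _ (by rw [List.length_zipWith]; omega), pv_zipWith_zipWith]

-- multiples of s among positions j+1, j ∈ [b, b+s), s ∣ b : exactly the last position
theorem pv_filter_window (s b : Int) (hs : 0 < s) (hb : s ∣ b) :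
    (PySem.List.pyRange b (b + s) 1).filter (fun j => decide (s ∣ (j + 1)))
      = [b + s - 1] := by
  obtain ⟨q, hq⟩ := hb
  have h1 : (PySem.List.pyRange b (b + s) 1).filter (fun j => decide (s ∣ (j + 1)))
      = (PySem.List.pyRange b (b + s) 1).filter (fun j => j == b + s - 1) := by
    apply List.filter_congr
    intro j hj
    rw [PySem.List.mem_pyRange_one] at hj
    show decide (s ∣ (j + 1)) = decide (j = b + s - 1)
    rw [decide_eq_decide]
    constructor
    · rintro ⟨t, ht⟩
      have h2 : s * q < s * t := by omega
      have h3 : s * t ≤ s * (q + 1) := by rw [mul_add, mul_one]; omega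
      have h4 : q < t := lt_of_mul_lt_mul_left h2 (by omega)
      have h5 : t ≤ q + 1 := le_of_mul_le_mul_left h3 hs
      have ht' : t = q + 1 := by omega
      subst ht'; rw [mul_add, mul_one] at ht; omega
    · intro h; exact ⟨q + 1, by rw [mul_add, mul_one]; omega⟩
  rw [h1, List.filter_beq, List.count_eq_one_of_mem (PySem.List.nodup_pyRange_one _ _)
    (by rw [PySem.List.mem_pyRange_one]; omega), List.replicate_one]

-- multiples of s among positions j+1, j ∈ [0, s*k) : j = s*i - 1 for i = 1..k
theorem pv_filter_range (s : Int) (k : Nat) (hs : 0 < s) :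
    (PySem.List.pyRange 0 (s * (k : Int)) 1).filter (fun j => decide (s ∣ (j + 1)))
      = (PySem.List.pyRange 1 ((k : Int) + 1) 1).map (fun i => s * i - 1) := by
  induction k with
  | zero =>
      rw [PySem.List.pyRange_one_eq_nil (by simp), PySem.List.pyRange_one_eq_nil (by norm_num)]
      rfl
  | succ k ih =>
      have hcast : ((k + 1 : Nat) : Int) = (k : Int) + 1 := by push_cast; ring
      have hsplit : PySem.List.pyRange 0 (s * ((k : Int) + 1)) 1
          = PySem.List.pyRange 0 (s * (k : Int)) 1
            ++ PySem.List.pyRange (s * (k : Int)) (s * (k : Int) + s) 1 := by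
        rw [← PySem.List.pyRange_one_append 0 (s * (k : Int)) (s * (k : Int) + s)
            (by positivity) (by omega)]
        ring_nf
      rw [hcast, hsplit, List.filter_append, ih,
          pv_filter_window s (s * (k : Int)) hs ⟨(k : Int), rfl⟩]
      conv_rhs => rw [PySem.List.pyRange_one_succ_right (by omega)]
      rw [List.map_append]
      congr 1
      simp only [List.map_cons, List.map_nil, List.cons.injEq, and_true]
      ring

-- i < k filter on range 1..k+1 keeps 1..k
theorem pv_filter_lt (k : Int) (hk : 1 ≤ k) :
    (PySem.List.pyRange 1 (k + 1) 1).filter (fun i => decide (i < k))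
      = PySem.List.pyRange 1 k 1 := by
  rw [PySem.List.pyRange_one_succ_right hk, List.filter_append]
  have h1 : (PySem.List.pyRange 1 k 1).filter (fun i => decide (i < k))
      = PySem.List.pyRange 1 k 1 := by
    apply List.filter_eq_self.mpr
    intro i hi
    rw [PySem.List.mem_pyRange_one] at hi
    simp [hi.2]
  simp [h1]

-- n = (n // d) * d when d divides n
theorem pv_n_eq (n d : Int) (h : PySem.Int.mod n d = 0) :
    n = PySem.Int.floordiv n d * d := by
  have := PySem.Int.floordiv_mul_add_mod n d
  omega

-- one family's streaming fold = A's indexed map over the quantile indices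
theorem pv_stream (a : List Int) (c : Int × String × String × Bool) (k : Nat)
    (hkk : (k : Int) = c.1) (hd : 0 < c.1)
    (hmod : PySem.Int.mod (a.length : Int) c.1 = 0) (hn : a ≠ []) :
    (PySem.List.enumerate a 0).foldl
        (fun bk jv => pvStepB (a.length : Int) jv.1 jv.2 c bk) []
      = (PySem.List.pyRange 1 c.1 1).map (fun i =>
          [c.2.1 ++ (if c.2.2.2 then pvFTenthB i else PySem.Int.toStr i),
           PySem.Int.toStr
             (pvGetI a (PySem.Int.floordiv (a.length : Int) c.1 * i - 1))]) := by
  set n : Int := (a.length : Int) with hn_def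
  set s : Int := PySem.Int.floordiv n c.1 with hs_def
  have hn0 : 0 < n := by
    have : a.length ≠ 0 := fun h => hn (List.length_eq_zero_iff.mp h)
    omega
  have hneq : n = s * c.1 := pv_n_eq n c.1 hmod
  have hs0 : 0 < s := by nlinarith
  have hneqk : n = s * (k : Int) := by rw [hkk]; exact hneq
  have hk1 : (1 : Int) ≤ (k : Int) := by omega
  calc (PySem.List.enumerate a 0).foldl
        (fun bk jv => pvStepB n jv.1 jv.2 c bk) []
      = (PySem.List.enumerate a 0).foldl
          (fun bk jv => if PySem.Int.mod (jv.1 + 1) s = 0 ∧ jv.1 + 1 < n then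
              bk ++ [[c.2.1 ++ (if c.2.2.2 then pvFTenthB (PySem.Int.floordiv (jv.1 + 1) s)
                                else PySem.Int.toStr (PySem.Int.floordiv (jv.1 + 1) s)),
                      PySem.Int.toStr jv.2]] else bk) [] := by
        apply PySem.List.foldl_congr_mem
        intro bk jv _; rfl
    _ = ((PySem.List.enumerate a 0).filter
          (fun jv => decide (PySem.Int.mod (jv.1 + 1) s = 0 ∧ jv.1 + 1 < n))).map
            (fun jv => [c.2.1 ++ (if c.2.2.2 then pvFTenthB (PySem.Int.floordiv (jv.1 + 1) s)
                                  else PySem.Int.toStr (PySem.Int.floordiv (jv.1 + 1) s)),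
                        PySem.Int.toStr jv.2]) := by
        rw [PySem.List.foldl_append_ite]; rfl
    _ = (PySem.List.pyRange 1 c.1 1).map (fun i =>
          [c.2.1 ++ (if c.2.2.2 then pvFTenthB i else PySem.Int.toStr i),
           PySem.Int.toStr (pvGetI a (s * i - 1))]) := by
        rw [PySem.List.enumerate_eq_map_pyRange a 0, List.filter_map, List.map_map]
        have hlen : PySem.List.len a = n := by simp [PySem.List.len, hn_def]
        rw [hlen]
        have hpred : ((PySem.List.pyRange 0 n 1).filter
              ((fun jv : Int × Int => decide (PySem.Int.mod (jv.1 + 1) s = 0 ∧ jv.1 + 1 < n)) ∘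
                (fun j => (j, PySem.List.pyGetD a j 0))))
            = ((PySem.List.pyRange 0 n 1).filter (fun j => decide (s ∣ (j + 1)))).filter
                (fun j => decide (j + 1 < n)) := by
          rw [List.filter_filter]
          apply List.filter_congr
          intro j _
          simp only [Function.comp_apply]
          rw [Bool.decide_and, decide_eq_decide.mpr (PySem.Int.mod_eq_zero_iff_dvd (j + 1) s),
              Bool.and_comm]
        rw [hpred]
        rw [show PySem.List.pyRange 0 n 1 = PySem.List.pyRange 0 (s * (k : Int)) 1 by
              rw [← hneqk]]
        rw [pv_filter_range s k hs0, List.filter_map]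
        have hpred2 : ((PySem.List.pyRange 1 ((k : Int) + 1) 1).filter
              ((fun j : Int => decide (j + 1 < n)) ∘ (fun i => s * i - 1)))
            = PySem.List.pyRange 1 (k : Int) 1 := by
          rw [← pv_filter_lt (k : Int) hk1]
          apply List.filter_congr
          intro i _
          simp only [Function.comp_apply]
          rw [decide_eq_decide]
          rw [hneqk]
          constructor
          · intro h
            exact lt_of_mul_lt_mul_left (by omega : s * i < s * (k : Int)) (by omega)
          · intro h
            have := Int.mul_lt_mul_of_pos_left h hs0
            omega
        rw [hpred2, List.map_map, ← hkk]
        apply List.map_congr_left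
        intro i hi
        simp only [Function.comp_apply]
        have hdiv : PySem.Int.floordiv (s * i - 1 + 1) s = i := by
          rw [show s * i - 1 + 1 = s * i by ring,
              PySem.Int.floordiv_eq_ediv_of_pos hs0, Int.mul_ediv_cancel_left _ (by omega)]
        rw [hdiv]
        have hget : PySem.List.pyGetD a (s * i - 1) 0
            = (PySem.List.pyGet? a (s * i - 1)).getD 0 := by
          simp [PySem.List.pyGetD, PySem.List.pyGet?]
        rw [hget]
        rfl

-- zipWith of a function against a constant-map of the same spine is a map
theorem pv_zipWith_const {γ σ : Type} (f : γ → σ → σ) (z : σ) (cs : List γ) :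
    List.zipWith f cs (cs.map (fun _ => z)) = cs.map (fun c => f c z) := by
  induction cs with
  | nil => rfl
  | cons c cs ih => simp only [List.map_cons, List.zipWith_cons_cons, ih]

-- l.zip (l.map h) pairs each element with its image
theorem pv_zip_map_self {γ σ : Type} (h : γ → σ) (cs : List γ) :
    cs.zip (cs.map h) = cs.map (fun c => (c, h c)) := by
  induction cs with
  | nil => rfl
  | cons c cs ih => simp [ih]

-- (k*n)//d = (n//d)*k when d divides n and 0 ≤ n
theorem pv_floordiv_mul (n k d : Int) (hd : 0 < d) (hn : 0 ≤ n)
    (h : PySem.Int.mod n d = 0) :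
    PySem.Int.floordiv (k * n) d = PySem.Int.floordiv n d * k := by
  obtain ⟨m, hm⟩ := (PySem.Int.mod_eq_zero_iff_dvd n d).mp h
  subst hm
  rw [PySem.Int.floordiv_eq_ediv_of_pos hd, PySem.Int.floordiv_eq_ediv_of_pos hd,
      show k * (d * m) = d * (k * m) by ring,
      Int.mul_ediv_cancel_left _ (by omega), Int.mul_ediv_cancel_left _ (by omega)]
  ring

-- ((d-1)*n)//d = n - n//d when d divides n
theorem pv_spread (a : List Int) (d mul : Int) (hd : 0 < d) (hmul : mul = d - 1)
    (hmod : PySem.Int.mod (a.length : Int) d = 0) :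
    PySem.Int.floordiv (mul * (a.length : Int)) d
      = (a.length : Int) - PySem.Int.floordiv (a.length : Int) d := by
  have hneq := pv_n_eq (a.length : Int) d hmod
  rw [pv_floordiv_mul _ mul d hd (by positivity) hmod, hmul, mul_sub, mul_one]
  omega

-- congruence through one divisor layer: same condition, same accumulated prefix
theorem pv_layer {α : Type} (c : Prop) [Decidable c] (p q x y : List α)
    (hpq : p = q) (hxy : c → x = y) :
    (if c then p ++ x else p) = (if c then q ++ y else q) := by
  subst hpq; split_ifs with hc
  · rw [hxy hc]
  · rfl

-- ===== VERDICT (by name: the statement is the Claim_ definition above) =====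
theorem getQuant_spec : Claim_equal_getQuant := by
  intro a _ hpre
  show getQuant a = getQuant_alt a
  simp only [getQuant, getQuant_alt]
  rw [pv_foldl_zipWith (fun c jv bk => pvStepB ((a.length : Int)) jv.1 jv.2 c bk)
        (PySem.List.enumerate a 0)
        (pvTableB.filter (fun c => decide (PySem.Int.mod ((a.length : Int)) c.1 = 0)))
        ((pvTableB.filter (fun c => decide (PySem.Int.mod ((a.length : Int)) c.1 = 0))).map
          (fun _ => ([] : List (List String))))
        (by simp),
      pv_zipWith_const, pv_zip_map_self, List.foldl_map,
      ← PySem.List.foldl_if_eq_foldl_filter]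
  simp only [pvTableB, List.foldl_cons, List.foldl_nil, decide_eq_true_eq,
    PySem.List.foldl_append_singleton_eq_map, List.nil_append, List.append_assoc]
  refine pv_layer _ _ _ _ _
    (pv_layer _ _ _ _ _ (pv_layer _ _ _ _ _ (pv_layer _ _ _ _ _ rfl ?h4) ?h10) ?h100)
    ?h1000
  case h4 =>
    intro hc
    rw [pv_stream a (4, "Q", "Q3 - Q1", false) 4 (by norm_num) (by norm_num) hc hpre,
        pv_spread a 4 3 (by norm_num) (by norm_num) hc]
    rfl
  case h10 =>
    intro hc
    rw [pv_stream a (10, "D", "D9 - D1", false) 10 (by norm_num) (by norm_num) hc hpre,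
        pv_spread a 10 9 (by norm_num) (by norm_num) hc]
    rfl
  case h100 =>
    intro hc
    rw [pv_stream a (100, "C", "C99 - C1", false) 100 (by norm_num) (by norm_num) hc hpre,
        pv_spread a 100 99 (by norm_num) (by norm_num) hc]
    rfl
  case h1000 =>
    intro hc
    rw [pv_stream a (1000, "M", "M99,9 - M0,1", true) 1000 (by norm_num) (by norm_num) hc hpre,
        pv_spread a 1000 999 (by norm_num) (by norm_num) hc]
    rfl
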